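-- pv_equiv track=rewrite | github.com/apanana/rosalind | pdpl.py | minkowski_diff
-- ===== SOURCE A (Python) =====
-- def minkowski_diff(xs):
-- 	ms = {}
-- 	for x in xs:
-- 		for y in xs:
-- 			if x == y:
-- 				continue
-- 			ms.setdefault(x-y,0)
-- 			ms[x-y] += 1
-- 	return ms
-- ===== SOURCE B (Python) =====
-- def minkowski_diff(xs):
-- 	freq = {}
-- 	for x in xs:
-- 		freq[x] = freq.get(x, 0) + 1
-- 	ms = {}
-- 	for a in freq:
-- 		for b in freq:
-- 			if a != b:
-- 				ms[a - b] = ms.get(a - b, 0) + freq[a] * freq[b]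
-- 	return ms
-- ===== Notes on version B (the rewrite author's own statement) =====
-- stated objective: alternative
-- what changed: B first builds a frequency table of the values, then iterates over ordered pairs of DISTINCT values a,b (a != b) and adds freq[a]*freq[b] to ms[a-b], instead of A's element-by-element double loop that increments by 1 per pair of positions; on duplicate-heavy input B touches far fewer pairs.
import Mathlib
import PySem

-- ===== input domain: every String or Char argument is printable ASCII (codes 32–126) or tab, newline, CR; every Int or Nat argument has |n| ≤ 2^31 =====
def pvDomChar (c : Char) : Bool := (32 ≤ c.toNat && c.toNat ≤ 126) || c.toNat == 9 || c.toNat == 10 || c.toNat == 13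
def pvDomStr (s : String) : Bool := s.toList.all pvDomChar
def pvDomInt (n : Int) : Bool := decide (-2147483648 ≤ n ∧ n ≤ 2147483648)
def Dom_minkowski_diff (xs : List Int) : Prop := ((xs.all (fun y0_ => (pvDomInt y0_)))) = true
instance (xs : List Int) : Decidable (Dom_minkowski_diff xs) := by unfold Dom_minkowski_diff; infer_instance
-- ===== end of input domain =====

-- B replaces A's element-by-element double loop by a frequency table over the distinct
-- values, adding freq[a]*freq[b] to ms[a-b] for each ordered pair of distinct values
-- (objective: alternative; fewer pairs on duplicate-heavy input). Same return value,
-- as insertion-ordered association lists.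

-- ===== PORT A =====
def minkowski_diff (xs : List Int) : List (Int × Int) :=
  (xs.foldl (fun ms x =>
      xs.foldl (fun ms y =>
          if x = y then ms
          else
            let ms := ms.setdefault (x - y) 0
            ms.insert (x - y) (ms.getD (x - y) 0 + 1)) ms)
    (PySem.Dict.empty : PySem.Dict Int Int)).items

-- ===== PORT B =====
def minkowski_diff_alt (xs : List Int) : List (Int × Int) :=
  let freq := xs.foldl (fun d x => d.insert x (d.getD x 0 + 1)) (PySem.Dict.empty : PySem.Dict Int Int)
  (freq.keys.foldl (fun ms a =>
      freq.keys.foldl (fun ms b =>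
          if a = b then ms
          else ms.insert (a - b) (ms.getD (a - b) 0 + freq.getD a 0 * freq.getD b 0)) ms)
    (PySem.Dict.empty : PySem.Dict Int Int)).items

-- ===== PRECONDITION & SPEC =====
def Spec_minkowski_diff (xs : List Int) (out : List (Int × Int)) : Prop := out = minkowski_diff_alt xs
instance (xs : List Int) (out : List (Int × Int)) : Decidable (Spec_minkowski_diff xs out) := by unfold Spec_minkowski_diff; infer_instance

-- ===== CLAIM (what is proved, stated in full; the proofs are below) =====
def Claim_equal_minkowski_diff : Prop := ∀ (xs : List Int), Dom_minkowski_diff xs → Spec_minkowski_diff xs (minkowski_diff xs)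

-- ===== LEMMAS AND PROOFS =====

-- the flattened key sequence of a difference double loop over the list l
def pvSA (l : List Int) : List Int :=
  l.flatMap (fun x => (l.filter (fun y => !(x == y))).map (fun y => x - y))

-- the flattened pair sequence of B's double loop over the distinct values vs
def pvPB (vs : List Int) : List (Int × Int) :=
  vs.flatMap (fun a => (vs.filter (fun b => !(a == b))).map (fun b => (a, b)))

-- B's weight of one ordered pair of distinct values
def pvW (xs : List Int) (p : Int × Int) : Int :=
  (List.count p.1 xs : Int) * (List.count p.2 xs : Int)

-- A's setdefault-then-increment step is the counter step
theorem pv_sd_step (d : PySem.Dict Int Int) (k : Int) :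
    (d.setdefault k 0).insert k ((d.setdefault k 0).getD k 0 + 1)
      = d.insert k (d.getD k 0 + 1) := by
  cases h : d.contains k with
  | true => rw [PySem.Dict.setdefault_of_contains d 0 h]
  | false =>
      rw [PySem.Dict.setdefault_of_not_contains d 0 h, PySem.Dict.getD_insert_self,
        PySem.Dict.insert_insert_self, PySem.Dict.getD_of_not_contains d 0 h]

-- A's inner loop, flattened to a counter fold over the keys it touches
theorem pv_innerA (ys : List Int) (x : Int) : ∀ d : PySem.Dict Int Int,
    ys.foldl (fun ms y => if x = y then ms
        else
          let ms := ms.setdefault (x - y) 0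
          ms.insert (x - y) (ms.getD (x - y) 0 + 1)) d
      = ((ys.filter (fun y => !(x == y))).map (fun y => x - y)).foldl
          (fun ms k => ms.insert k (ms.getD k 0 + 1)) d := by
  induction ys with
  | nil => intro d; rfl
  | cons y ys ih =>
      intro d
      by_cases h : x = y
      · have hb : (!(x == y)) = false := by simp [h]
        simp only [List.foldl_cons, List.filter_cons, if_pos h, hb, Bool.false_eq_true,
          if_false]
        exact ih d
      · have hb : (!(x == y)) = true := by simp [h]
        simp only [List.foldl_cons, List.filter_cons, hb, if_neg h, if_true, List.map_cons]
        rw [← ih, pv_sd_step]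

-- A's result: the items of the counter of pvSA xs
theorem pv_A_items (xs : List Int) :
    minkowski_diff xs
      = (PySem.Set.ofList (pvSA xs)).map (fun k => (k, (List.count k (pvSA xs) : Int))) := by
  unfold minkowski_diff
  have h : xs.foldl (fun ms x =>
        xs.foldl (fun ms y => if x = y then ms
          else
            let ms := ms.setdefault (x - y) 0
            ms.insert (x - y) (ms.getD (x - y) 0 + 1)) ms)
        (PySem.Dict.empty : PySem.Dict Int Int)
      = (pvSA xs).foldl (fun ms k => ms.insert k (ms.getD k 0 + 1)) PySem.Dict.empty := by
    rw [pvSA, List.foldl_flatMap]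
    simp only [pv_innerA]
  rw [h, PySem.Dict.foldl_insert_getD_add_one_eq_counter, PySem.Dict.items_counter]

-- B's inner loop, flattened to a weighted fold over ordered pairs
theorem pv_innerB (xs ks : List Int) (a : Int) : ∀ d : PySem.Dict Int Int,
    ks.foldl (fun ms b => if a = b then ms
        else ms.insert (a - b)
          (ms.getD (a - b) 0 + (List.count a xs : Int) * (List.count b xs : Int))) d
      = ((ks.filter (fun b => !(a == b))).map (fun b => (a, b))).foldl
          (fun ms p => ms.insert (p.1 - p.2) (ms.getD (p.1 - p.2) 0 + pvW xs p)) d := by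
  induction ks with
  | nil => intro d; rfl
  | cons b ks ih =>
      intro d
      by_cases h : a = b
      · have hb : (!(a == b)) = false := by simp [h]
        simp only [List.foldl_cons, List.filter_cons, if_pos h, hb, Bool.false_eq_true,
          if_false]
        exact ih d
      · have hb : (!(a == b)) = true := by simp [h]
        simp only [List.foldl_cons, List.filter_cons, hb, if_neg h, if_true, List.map_cons]
        rw [← ih]; rfl

-- B's result as a weighted fold over pvPB of the distinct values
theorem pv_B_dict (xs : List Int) :
    minkowski_diff_alt xs
      = ((pvPB (PySem.Set.ofList xs)).foldl
          (fun ms p => ms.insert (p.1 - p.2) (ms.getD (p.1 - p.2) 0 + pvW xs p))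
          (PySem.Dict.empty : PySem.Dict Int Int)).items := by
  unfold minkowski_diff_alt
  simp only [PySem.Dict.foldl_insert_getD_add_one_eq_counter, PySem.Dict.keys_counter,
    PySem.Dict.getD_counter]
  rw [pvPB, List.foldl_flatMap]
  simp only [pv_innerB]

-- lookup in the weighted fold: the sum of the weights of the matching pairs
theorem pv_getD_fold (w : Int × Int → Int) (l : List (Int × Int)) :
    ∀ (d : PySem.Dict Int Int) (k : Int),
    (l.foldl (fun ms p => ms.insert (p.1 - p.2) (ms.getD (p.1 - p.2) 0 + w p)) d).getD k 0
      = d.getD k 0 + ((l.filter (fun p => p.1 - p.2 == k)).map w).sum := by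
  induction l with
  | nil => intro d k; simp
  | cons p l ih =>
      intro d k
      simp only [List.foldl_cons, List.filter_cons]
      rw [ih]
      by_cases h : p.1 - p.2 = k
      · subst h
        simp
        ring
      · have hb : (p.1 - p.2 == k) = false := by simp [h]
        have hk : ¬ (k = p.1 - p.2) := fun hk => h hk.symm
        simp [hb, PySem.Dict.getD_insert, hk]

-- keys of pvPB, mapped to differences, give pvSA of the distinct values
theorem pv_mapkey (vs : List Int) :
    (pvPB vs).map (fun p => p.1 - p.2) = pvSA vs := by
  simp [pvPB, pvSA, List.map_flatMap, List.map_map, Function.comp_def]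

-- B's result in closed form
theorem pv_B_items (xs : List Int) :
    minkowski_diff_alt xs
      = (PySem.Set.ofList (pvSA (PySem.Set.ofList xs))).map
          (fun k => (k, (((pvPB (PySem.Set.ofList xs)).filter (fun p => p.1 - p.2 == k)).map
            (pvW xs)).sum)) := by
  rw [pv_B_dict]
  have hkeys := PySem.Dict.keys_foldl_insert_key (pvPB (PySem.Set.ofList xs))
    (fun p => p.1 - p.2) (fun ms p => ms.getD (p.1 - p.2) 0 + pvW xs p)
    (PySem.Dict.empty : PySem.Dict Int Int)
  have hnd := PySem.Dict.nodup_keys_foldl_insert_key (pvPB (PySem.Set.ofList xs))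
    (fun p => p.1 - p.2) (fun ms p => ms.getD (p.1 - p.2) 0 + pvW xs p)
    (PySem.Dict.empty : PySem.Dict Int Int) PySem.Dict.nodup_keys_empty
  rw [PySem.Dict.items_eq_map_keys _ hnd 0, hkeys, PySem.Dict.keys_empty]
  have hupd : PySem.Set.update ([] : PySem.Set Int)
      ((pvPB (PySem.Set.ofList xs)).map (fun p => p.1 - p.2))
      = PySem.Set.ofList (pvSA (PySem.Set.ofList xs)) := by
    rw [pv_mapkey]; rfl
  rw [hupd]
  apply List.map_congr_left
  intro k _
  rw [pv_getD_fold, PySem.Dict.getD_empty, zero_add]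

-- membership in Set.add / update helpers
theorem pv_add_of_mem (s : PySem.Set Int) (x : Int) (h : x ∈ s) : PySem.Set.add s x = s := by
  simp [PySem.Set.add, h]

theorem pv_add_of_not_mem (s : PySem.Set Int) (x : Int) (h : x ∉ s) :
    PySem.Set.add s x = s ++ [x] := by
  simp [PySem.Set.add, h]

theorem pv_update_append (s : PySem.Set Int) (l1 l2 : List Int) :
    PySem.Set.update s (l1 ++ l2) = PySem.Set.update (PySem.Set.update s l1) l2 := by
  show (l1 ++ l2).foldl PySem.Set.add s = _
  rw [List.foldl_append]; rfl

theorem pv_ofList_append_singleton (l : List Int) (a : Int) :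
    PySem.Set.ofList (l ++ [a]) = PySem.Set.add (PySem.Set.ofList l) a := by
  show (l ++ [a]).foldl PySem.Set.add [] = _
  rw [List.foldl_append]; rfl

theorem pv_update_eq_of_subset (l : List Int) : ∀ s : PySem.Set Int,
    (∀ e ∈ l, e ∈ s) → PySem.Set.update s l = s := by
  induction l with
  | nil => intro s _; rfl
  | cons x l ih =>
      intro s h
      show l.foldl PySem.Set.add (PySem.Set.add s x) = s
      rw [pv_add_of_mem s x (h x (by simp))]
      exact ih s (fun e he => h e (by simp [he]))

-- updating with a block built over l equals updating with the block over its distinct values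
theorem pv_upd_block (x : Int) (l : List Int) : ∀ s : PySem.Set Int,
    PySem.Set.update s ((l.filter (fun y => !(x == y))).map (fun y => x - y))
      = PySem.Set.update s (((PySem.Set.ofList l).filter (fun y => !(x == y))).map (fun y => x - y)) := by
  induction l using List.reverseRecOn with
  | nil => intro s; rfl
  | append_singleton l a ih =>
      intro s
      by_cases hm : a ∈ l
      · rw [pv_ofList_append_singleton, pv_add_of_mem _ a ((PySem.Set.mem_ofList l a).mpr hm)]
        rw [List.filter_append, List.map_append, pv_update_append, ih]
        by_cases hp : (!(x == a)) = true
        · have hsing : ([a].filter (fun y => !(x == y))).map (fun y => x - y) = [x - a] := by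
            simp [hp]
          rw [hsing]
          apply pv_update_eq_of_subset
          intro e he
          simp only [List.mem_singleton] at he
          subst he
          apply (PySem.Set.mem_update _ _ _).mpr
          right
          simp only [List.mem_map, List.mem_filter]
          exact ⟨a, ⟨(PySem.Set.mem_ofList l a).mpr hm, hp⟩, rfl⟩
        · have hsing : ([a].filter (fun y => !(x == y))).map (fun y => x - y) = [] := by
            simp only [Bool.not_eq_true] at hp
            simp [hp]
          rw [hsing]; rfl
      · rw [pv_ofList_append_singleton,
          pv_add_of_not_mem _ a (fun hc => hm ((PySem.Set.mem_ofList l a).mp hc)),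
          List.filter_append, List.map_append, pv_update_append,
          List.filter_append, List.map_append, pv_update_append, ih]

-- elements contributed by any processed x stay in the running set
theorem pv_mem_foldl_upd (F : Int → List Int) (l : List Int) : ∀ (s : PySem.Set Int) (e : Int),
    (e ∈ s ∨ ∃ x ∈ l, e ∈ F x) →
      e ∈ l.foldl (fun s x => PySem.Set.update s (F x)) s := by
  induction l with
  | nil =>
      intro s e h
      rcases h with h | ⟨x, hx, _⟩
      · exact h
      · exact absurd hx (List.not_mem_nil)
  | cons y l ih =>
      intro s e h
      simp only [List.foldl_cons]
      apply ih
      rcases h with h | ⟨x, hx, he⟩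
      · exact Or.inl ((PySem.Set.mem_update _ _ _).mpr (Or.inl h))
      · rcases List.mem_cons.mp hx with rfl | hx
        · exact Or.inl ((PySem.Set.mem_update _ _ _).mpr (Or.inr he))
        · exact Or.inr ⟨x, hx, he⟩

-- folding the update over a list or over its distinct values gives the same set
theorem pv_foldl_upd_ofList (F : Int → List Int) (l : List Int) : ∀ s : PySem.Set Int,
    l.foldl (fun s x => PySem.Set.update s (F x)) s
      = (PySem.Set.ofList l).foldl (fun s x => PySem.Set.update s (F x)) s := by
  induction l using List.reverseRecOn with
  | nil => intro s; rfl
  | append_singleton l a ih =>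
      intro s
      rw [List.foldl_append, pv_ofList_append_singleton]
      by_cases hm : a ∈ l
      · rw [pv_add_of_mem _ a ((PySem.Set.mem_ofList l a).mpr hm), ← ih]
        simp only [List.foldl_cons, List.foldl_nil]
        apply pv_update_eq_of_subset
        intro e he
        exact pv_mem_foldl_upd F l s e (Or.inr ⟨a, hm, he⟩)
      · rw [pv_add_of_not_mem _ a (fun hc => hm ((PySem.Set.mem_ofList l a).mp hc)),
          List.foldl_append, ← ih]

-- G1: the key set (with its first-insertion order) is the same for A and B
theorem pv_G1 (xs : List Int) :
    PySem.Set.ofList (pvSA (PySem.Set.ofList xs)) = PySem.Set.ofList (pvSA xs) := by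
  have hflat : ∀ (F : Int → List Int) (l : List Int),
      PySem.Set.ofList (l.flatMap F)
        = l.foldl (fun s x => PySem.Set.update s (F x)) ([] : PySem.Set Int) := by
    intro F l
    show (l.flatMap F).foldl PySem.Set.add [] = _
    rw [List.foldl_flatMap]
    rfl
  simp only [pvSA]
  rw [hflat, hflat, ← pv_foldl_upd_ofList]
  have hfun : (fun (s : PySem.Set Int) (x : Int) =>
        PySem.Set.update s (((PySem.Set.ofList xs).filter (fun y => !(x == y))).map (fun y => x - y)))
      = (fun (s : PySem.Set Int) (x : Int) =>
        PySem.Set.update s ((xs.filter (fun y => !(x == y))).map (fun y => x - y))) :=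
    funext fun s => funext fun x => (pv_upd_block x xs s).symm
  rw [hfun]

-- count of a key inside one of A's blocks
theorem pv_blockcount (l : List Int) (x k : Int) :
    List.count k ((l.filter (fun y => !(x == y))).map (fun y => x - y))
      = if k = 0 then 0 else List.count (x - k) l := by
  by_cases h0 : k = 0
  · subst h0
    rw [if_pos rfl, List.count_eq_zero]
    intro hmem
    rcases List.mem_map.mp hmem with ⟨y, hy, hxy⟩
    have hyx : y = x := by omega
    have := (List.mem_filter.mp hy).2
    rw [hyx] at this
    simp at this
  · rw [if_neg h0]
    have h1 : List.count k ((l.filter (fun y => !(x == y))).map (fun y => x - y))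
        = List.count (x - k) (l.filter (fun y => !(x == y))) := by
      have hk : k = x - (x - k) := by ring
      conv_lhs => rw [hk]
      exact List.count_map_of_injective _ _ sub_right_injective _
    rw [h1, List.count_filter (by simp; omega)]

-- count of a key in the whole of A's flattened sequence
theorem pv_count_SA (xs : List Int) (k : Int) :
    List.count k (pvSA xs)
      = if k = 0 then 0 else (xs.map (fun x => List.count (x - k) xs)).sum := by
  rw [pvSA, List.count_flatMap]
  by_cases h0 : k = 0
  · rw [if_pos h0]
    apply List.sum_eq_zero
    intro n hn
    rcases List.mem_map.mp hn with ⟨x, _, rfl⟩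
    simp only [Function.comp_apply]
    rw [pv_blockcount, if_pos h0]
  · rw [if_neg h0]
    refine congrArg List.sum (List.map_congr_left fun x _ => ?_)
    simp only [Function.comp_apply]
    rw [pv_blockcount, if_neg h0]

-- distributing the filtered weighted sum over the flatMap
theorem pv_sum_filter_flatMap {α β : Type} (F : α → List β) (q : β → Bool) (w : β → Int)
    (l : List α) :
    (((l.flatMap F).filter q).map w).sum
      = (l.map (fun a => (((F a).filter q).map w).sum)).sum := by
  induction l with
  | nil => rfl
  | cons a l ih =>
      simp only [List.flatMap_cons, List.filter_append, List.map_append, List.sum_append,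
        List.map_cons, List.sum_cons, ih]

-- one row of B's sum, evaluated over the distinct values
theorem pv_inner_sum (xs : List Int) (a k : Int) :
    (((((PySem.Set.ofList xs).filter (fun b => !(a == b))).map (fun b => (a, b))).filter
        (fun p => p.1 - p.2 == k)).map (pvW xs)).sum
      = if k = 0 then 0
        else (List.count a xs : Int) * (List.count (a - k) xs : Int) := by
  rw [List.filter_map, List.map_map, List.filter_filter]
  by_cases h0 : k = 0
  · rw [if_pos h0]
    have hnil : (PySem.Set.ofList xs).filter
        (fun b => ((fun p : Int × Int => p.1 - p.2 == k) ∘ fun b => (a, b)) b && !(a == b)) = [] := by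
      rw [List.filter_eq_nil_iff]
      intro b _
      simp only [Function.comp_apply, Bool.and_eq_true, beq_iff_eq, Bool.not_eq_true',
        beq_eq_false_iff_ne, ne_eq]
      rintro ⟨hab, hne⟩
      omega
    rw [hnil]
    rfl
  · rw [if_neg h0]
    have hcong : (PySem.Set.ofList xs).filter
        (fun b => ((fun p : Int × Int => p.1 - p.2 == k) ∘ fun b => (a, b)) b && !(a == b))
        = (PySem.Set.ofList xs).filter (fun b => b == a - k) := by
      apply List.filter_congr
      intro b _
      simp only [Function.comp_apply]
      by_cases hb : b = a - k
      · subst hb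
        have h1 : a - (a - k) = k := by ring
        have h2 : ¬ (a = a - k) := by omega
        simp [h1, h2]
      · have h1 : ¬ (a - b = k) := by omega
        have e1 : (a - b == k) = false := by simp [h1]
        have e2 : (b == a - k) = false := by simp [hb]
        rw [e1, e2, Bool.false_and]
    rw [hcong, List.filter_beq, List.map_replicate, List.sum_replicate]
    by_cases hm : a - k ∈ xs
    · have h1 : List.count (a - k) (PySem.Set.ofList xs) = 1 :=
        List.count_eq_one_of_mem (PySem.Set.nodup_ofList xs)
          ((PySem.Set.mem_ofList xs _).mpr hm)
      rw [h1, one_smul]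
      rfl
    · have h1 : List.count (a - k) (PySem.Set.ofList xs) = 0 :=
        List.count_eq_zero.mpr (fun hmem => hm ((PySem.Set.mem_ofList xs _).mp hmem))
      have h2 : List.count (a - k) xs = 0 := List.count_eq_zero.mpr hm
      rw [h1, zero_smul, h2]
      simp

-- grouping a sum over xs into a weighted sum over the distinct values
theorem pv_group (xs : List Int) (g : Int → ℕ) :
    (((xs.map g).sum : ℕ) : Int)
      = ((PySem.Set.ofList xs).map (fun a => (List.count a xs : Int) * (g a : Int))).sum := by
  have h1 : (xs.map g).sum = ∑ a ∈ xs.toFinset, List.count a xs * g a := by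
    rw [Finset.sum_list_map_count]
    simp [smul_eq_mul]
  have h2 : xs.toFinset = (PySem.Set.ofList xs).toFinset := by
    ext a
    simp [List.mem_toFinset, PySem.Set.mem_ofList]
  rw [h1, h2, List.sum_toFinset _ (PySem.Set.nodup_ofList xs), Nat.cast_list_sum,
    List.map_map]
  refine congrArg List.sum (List.map_congr_left fun a _ => ?_)
  simp only [Function.comp_apply]
  push_cast
  ring

-- G2: A's multiplicity of each key equals B's weighted sum for that key
theorem pv_G2 (xs : List Int) (k : Int) :
    ((List.count k (pvSA xs) : Nat) : Int)
      = (((pvPB (PySem.Set.ofList xs)).filter (fun p => p.1 - p.2 == k)).map (pvW xs)).sum := by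
  rw [pvPB, pv_sum_filter_flatMap, pv_count_SA]
  by_cases h0 : k = 0
  · rw [if_pos h0]
    have hz : ((PySem.Set.ofList xs).map (fun a =>
        (((((PySem.Set.ofList xs).filter (fun b => !(a == b))).map (fun b => (a, b))).filter
          (fun p => p.1 - p.2 == k)).map (pvW xs)).sum)) = (PySem.Set.ofList xs).map (fun _ => (0 : Int)) :=
      List.map_congr_left (fun a _ => by rw [pv_inner_sum, if_pos h0])
    rw [hz]
    simp
  · rw [if_neg h0]
    have hmap : ((PySem.Set.ofList xs).map (fun a =>
        (((((PySem.Set.ofList xs).filter (fun b => !(a == b))).map (fun b => (a, b))).filter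
          (fun p => p.1 - p.2 == k)).map (pvW xs)).sum))
        = (PySem.Set.ofList xs).map (fun a => (List.count a xs : Int) * (List.count (a - k) xs : Int)) :=
      List.map_congr_left (fun a _ => by rw [pv_inner_sum, if_neg h0])
    rw [hmap]
    exact pv_group xs (fun x => List.count (x - k) xs)

-- ===== VERDICT (by name: the statement is the Claim_ definition above) =====
theorem minkowski_diff_spec : Claim_equal_minkowski_diff := by
  intro xs _
  unfold Spec_minkowski_diff
  rw [pv_A_items, pv_B_items, pv_G1]
  apply List.map_congr_left
  intro k _
  exact congrArg (Prod.mk k) (pv_G2 xs k)
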